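-- pv_equiv track=rewrite | github.com/parc-nsi/PCSI | TP10/corrige/I1-TP-10-Listes_de_Listes-corrige.py | indices_difference_maxi
-- ===== SOURCE A (Python) =====
-- def indices_difference_maxi(t):
--     '''retourne un couple (i,j) tel que i>=j et abs(ti-tj) maximal'''
--     couple = (0,0)
--     maxi = 0
--     for j in range(len(t)):
--         for i in range(j+1,len(t)):
--             ecart = abs(t[i]-t[j])
--             if ecart > maxi:
--                 couple = (i,j)
--                 maxi = ecart
--     return couple
-- ===== SOURCE B (Python) =====
-- def indices_difference_maxi(t):
--     '''retourne un couple (i,j) tel que i>=j et abs(ti-tj) maximal'''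
--     if len(t) < 2:
--         return (0, 0)
--     lo = min(t)
--     hi = max(t)
--     if lo == hi:
--         return (0, 0)
--     ilo = t.index(lo)
--     ihi = t.index(hi)
--     if ilo < ihi:
--         return (ihi, ilo)
--     return (ilo, ihi)
-- ===== Notes on version B (the rewrite author's own statement) =====
-- stated objective: faster
-- what changed: B replaces A's O(n^2) scan over all index pairs by a closed form: the maximal |t[i]-t[j]| is max(t)-min(t), and A's tie-breaking pick is exactly the pair of first occurrences of the min and the max, found with min/max/index in O(n).
import Mathlib
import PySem

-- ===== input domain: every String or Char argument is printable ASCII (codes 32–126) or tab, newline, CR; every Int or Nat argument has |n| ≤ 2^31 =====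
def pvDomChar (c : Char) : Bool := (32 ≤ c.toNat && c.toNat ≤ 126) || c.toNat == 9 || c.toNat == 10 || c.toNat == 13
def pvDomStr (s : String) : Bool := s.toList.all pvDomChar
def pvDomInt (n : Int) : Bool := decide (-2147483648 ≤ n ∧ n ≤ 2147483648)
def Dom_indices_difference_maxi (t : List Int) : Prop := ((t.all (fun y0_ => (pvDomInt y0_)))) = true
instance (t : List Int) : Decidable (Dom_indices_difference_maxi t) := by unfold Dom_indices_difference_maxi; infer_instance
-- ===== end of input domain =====

-- B replaces A's O(n^2) scan of all pairs by an O(n) closed form: the maximal |t[i]-t[j]| is max(t)-min(t),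
-- attained first (in A's scan order) at the first occurrences of min(t) and max(t).

-- ===== PORT A =====
def indices_difference_maxi (t : List Int) : Int × Int :=
  (((PySem.List.pyRange 0 (PySem.List.len t) 1).foldl
    (fun st j =>
      (PySem.List.pyRange (j+1) (PySem.List.len t) 1).foldl
        (fun st i =>
          let ecart := |PySem.List.pyGetD t i 0 - PySem.List.pyGetD t j 0|
          if st.2 < ecart then ((i, j), ecart) else st) st)
    (((0 : Int), (0 : Int)), (0 : Int)))).1

-- ===== PORT B =====
def indices_difference_maxi_alt (t : List Int) : Int × Int :=
  if PySem.List.len t < 2 then (0, 0)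
  else
    match PySem.List.min? t (fun x => x), PySem.List.max? t (fun x => x) with
    | some lo, some hi =>
      if lo == hi then (0, 0)
      else
        match PySem.List.index? t lo, PySem.List.index? t hi with
        | some ilo, some ihi =>
          if ilo < ihi then ((ihi : Int), (ilo : Int)) else ((ilo : Int), (ihi : Int))
        | _, _ => (0, 0)
    | _, _ => (0, 0)

-- ===== PRECONDITION & SPEC =====
def Spec_indices_difference_maxi (t : List Int) (out : Int × Int) : Prop := out = indices_difference_maxi_alt t
instance (t : List Int) (out : Int × Int) : Decidable (Spec_indices_difference_maxi t out) := by unfold Spec_indices_difference_maxi; infer_instance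

-- ===== CLAIM (what is proved, stated in full; the proofs are below) =====
def Claim_equal_indices_difference_maxi : Prop := ∀ (t : List Int), Dom_indices_difference_maxi t → Spec_indices_difference_maxi t (indices_difference_maxi t)

-- ===== LEMMAS AND PROOFS =====

-- e t (j, i) is A's "ecart" for the pair of indices (j, i)
def pvE (t : List Int) (p : Int × Int) : Int :=
  |PySem.List.pyGetD t p.2 0 - PySem.List.pyGetD t p.1 0|

-- A's loop body, over pairs (j, i)
def pvStep (t : List Int) (st : (Int × Int) × Int) (p : Int × Int) : (Int × Int) × Int :=
  if st.2 < pvE t p then ((p.2, p.1), pvE t p) else st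

-- running maximum of pvE over a list of pairs
def pvMx (t : List Int) (L : List (Int × Int)) (m0 : Int) : Int :=
  L.foldl (fun m p => max m (pvE t p)) m0

-- A's pair list, in A's scan order
def pvPairs (t : List Int) : List (Int × Int) :=
  (PySem.List.pyRange 0 (PySem.List.len t) 1).flatMap
    (fun j => (PySem.List.pyRange (j+1) (PySem.List.len t) 1).map (fun i => (j, i)))

-- strict lexicographic order on pairs (A's scan order)
def pvLex (p q : Int × Int) : Prop := p.1 < q.1 ∨ (p.1 = q.1 ∧ p.2 < q.2)

lemma pv_foldl_nested {β : Type} (L : List Int) (M : Int → List Int) (g : Int → β → Int → β) :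
    ∀ (st : β), L.foldl (fun st j => (M j).foldl (g j) st) st
      = (L.flatMap (fun j => (M j).map (fun i => (j, i)))).foldl (fun st p => g p.1 st p.2) st := by
  induction L with
  | nil => intro st; rfl
  | cons a L ih => intro st; simp only [List.foldl_cons, List.flatMap_cons, List.foldl_append,
      List.foldl_map, ih]

lemma pvA_eq_fold (t : List Int) :
    indices_difference_maxi t = ((pvPairs t).foldl (pvStep t) ((0, 0), 0)).1 := by
  unfold indices_difference_maxi pvPairs
  rw [pv_foldl_nested (β := (Int × Int) × Int)
      (M := fun j => PySem.List.pyRange (j+1) (PySem.List.len t) 1)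
      (g := fun j st i =>
        let ecart := |PySem.List.pyGetD t i 0 - PySem.List.pyGetD t j 0|
        if st.2 < ecart then ((i, j), ecart) else st)]
  rfl

lemma pvMx_le (t : List Int) (L : List (Int × Int)) (m0 : Int) :
    m0 ≤ pvMx t L m0 ∧ ∀ p ∈ L, pvE t p ≤ pvMx t L m0 := by
  unfold pvMx
  exact PySem.List.le_foldl_max_int L (pvE t) m0

lemma pvMx_attained (t : List Int) (L : List (Int × Int)) (m0 : Int) :
    pvMx t L m0 = m0 ∨ ∃ p ∈ L, pvE t p = pvMx t L m0 := by
  have hmap : pvMx t L m0 = (L.map (pvE t)).foldl max m0 := by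
    unfold pvMx; rw [List.foldl_map]
  rcases PySem.List.foldl_max_mem (L.map (pvE t)) m0 with h | h
  · left; rw [hmap]; exact h
  · right
    rcases List.mem_map.1 h with ⟨p, hp, he⟩
    exact ⟨p, hp, by rw [hmap]; exact he⟩

-- characterisation of A's fold: final maxi is the running max, final couple is the
-- (reversed) first pair attaining it
lemma pv_fold_char (t : List Int) :
    ∀ (L : List (Int × Int)) (st : (Int × Int) × Int),
      L.foldl (pvStep t) st =
        (if st.2 < pvMx t L st.2 then
            (L.find? (fun p => pvE t p == pvMx t L st.2)).elim st.1 (fun p => (p.2, p.1))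
          else st.1, pvMx t L st.2) := by
  intro L
  induction L with
  | nil =>
    intro st
    simp [pvMx]
  | cons p L ih =>
    intro st
    rw [List.foldl_cons]
    by_cases h : st.2 < pvE t p
    · rw [show pvStep t st p = ((p.2, p.1), pvE t p) from by simp [pvStep, h], ih]
      dsimp only
      have hmx : pvMx t (p :: L) st.2 = pvMx t L (pvE t p) := by
        unfold pvMx
        rw [List.foldl_cons, max_eq_right (le_of_lt h)]
      have hle : pvE t p ≤ pvMx t L (pvE t p) := (pvMx_le t L (pvE t p)).1
      rw [hmx, if_pos (show st.2 < pvMx t L (pvE t p) by omega)]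
      by_cases h2 : pvE t p < pvMx t L (pvE t p)
      · rw [if_pos h2]
        have hne : (pvE t p == pvMx t L (pvE t p)) = false := by simp; omega
        simp only [List.find?_cons, hne]
        have hattain : ∃ q ∈ L, pvE t q = pvMx t L (pvE t p) := by
          rcases pvMx_attained t L (pvE t p) with h3 | h3
          · omega
          · exact h3
        rcases hattain with ⟨q, hq, hqe⟩
        cases hfind : L.find? (fun q => pvE t q == pvMx t L (pvE t p)) with
        | none =>
          have := List.find?_eq_none.1 hfind q hq
          simp [hqe] at this
        | some r => simp
      · have heq : pvMx t L (pvE t p) = pvE t p := le_antisymm (by omega) hle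
        rw [if_neg h2]
        have hpt : (pvE t p == pvMx t L (pvE t p)) = true := by simp [heq]
        simp only [List.find?_cons, hpt]
        rfl
    · rw [show pvStep t st p = st from by simp [pvStep, h], ih]
      have hmx : pvMx t (p :: L) st.2 = pvMx t L st.2 := by
        unfold pvMx
        rw [List.foldl_cons, max_eq_left (by omega)]
      rw [hmx]
      by_cases h2 : st.2 < pvMx t L st.2
      · rw [if_pos h2, if_pos h2]
        have hne : (pvE t p == pvMx t L st.2) = false := by simp; omega
        simp only [List.find?_cons, hne]
      · rw [if_neg h2, if_neg h2]

lemma pv_find_first {α : Type} (R : α → α → Prop) (pred : α → Bool)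
    (hasym : ∀ a b, R a b → R b a → False) :
    ∀ (L : List α), L.Pairwise R → ∀ x ∈ L, pred x = true →
      (∀ y ∈ L, pred y = true → y = x ∨ R x y) → L.find? pred = some x := by
  intro L
  induction L with
  | nil => intro _ x hx; exact absurd hx (List.not_mem_nil)
  | cons a L ih =>
    intro hpw x hx hpx hmin
    rcases List.mem_cons.1 hx with rfl | hxL
    · simp [hpx]
    · have hRax : R a x := (List.pairwise_cons.1 hpw).1 x hxL
      have hpa : pred a = false := by
        by_contra hpa'
        have hpa : pred a = true := by simpa using hpa'
        rcases hmin a List.mem_cons_self hpa with rfl | hR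
        · exact hasym a a hRax hRax
        · exact hasym a x hRax hR
      simp only [List.find?_cons, hpa]
      exact ih (List.pairwise_cons.1 hpw).2 x hxL hpx
        (fun y hy hpy => hmin y (List.mem_cons_of_mem _ hy) hpy)

lemma pv_mem_pairs (t : List Int) (p : Int × Int) :
    p ∈ pvPairs t ↔ 0 ≤ p.1 ∧ p.1 < p.2 ∧ p.2 < PySem.List.len t := by
  unfold pvPairs
  simp only [List.mem_flatMap, List.mem_map, PySem.List.mem_pyRange_one]
  constructor
  · rintro ⟨j, ⟨hj0, hjn⟩, i, ⟨hji, hin⟩, rfl⟩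
    exact ⟨hj0, by omega, hin⟩
  · rintro ⟨h0, h12, h2n⟩
    exact ⟨p.1, ⟨h0, by omega⟩, p.2, ⟨by omega, h2n⟩, rfl⟩

lemma pv_pairs_pairwise (t : List Int) : (pvPairs t).Pairwise pvLex := by
  unfold pvPairs
  rw [List.pairwise_flatMap]
  constructor
  · intro j hj
    rw [List.pairwise_map]
    exact (PySem.List.pairwise_lt_pyRange_one _ _).imp (fun h => Or.inr ⟨rfl, h⟩)
  · refine (PySem.List.pairwise_lt_pyRange_one _ _).imp ?_
    intro a b hab x hx y hy
    rcases List.mem_map.1 hx with ⟨i, _, rfl⟩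
    rcases List.mem_map.1 hy with ⟨i', _, rfl⟩
    exact Or.inl hab

-- ===== VERDICT (by name: the statement is the Claim_ definition above) =====
lemma pvLex_asym : ∀ a b : Int × Int, pvLex a b → pvLex b a → False := by
  intro a b h1 h2
  rcases h1 with h | ⟨h, h'⟩ <;> rcases h2 with g | ⟨g, g'⟩ <;> omega

theorem indices_difference_maxi_spec : Claim_equal_indices_difference_maxi := by
  unfold Claim_equal_indices_difference_maxi
  intro t _
  unfold Spec_indices_difference_maxi
  rw [pvA_eq_fold, pv_fold_char]
  dsimp only
  have hnlen : PySem.List.len t = (t.length : Int) := by simp [PySem.List.len_eq]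
  by_cases hlen : PySem.List.len t < 2
  · -- fewer than two elements: no pair, both sides (0, 0)
    have hpairs : pvPairs t = [] := by
      rw [List.eq_nil_iff_forall_not_mem]
      intro p hp
      have := (pv_mem_pairs t p).1 hp
      omega
    rw [hpairs]
    unfold indices_difference_maxi_alt
    rw [if_pos hlen]
    simp [pvMx]
  · have hlen2 : (2 : Int) ≤ (t.length : Int) := by omega
    have htne : t ≠ [] := by
      intro h; subst h; simp at hlen2
    obtain ⟨lo, hmin⟩ : ∃ lo, PySem.List.min? t (fun x => x) = some lo := by
      cases hm : PySem.List.min? t (fun x => x) with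
      | none => exact absurd ((PySem.List.min?_eq_none_iff t _).1 hm) htne
      | some lo => exact ⟨lo, rfl⟩
    obtain ⟨hi, hmax⟩ : ∃ hi, PySem.List.max? t (fun x => x) = some hi := by
      cases hm : PySem.List.max? t (fun x => x) with
      | none => exact absurd ((PySem.List.max?_eq_none_iff t _).1 hm) htne
      | some hi => exact ⟨hi, rfl⟩
    have hlo_mem : lo ∈ t := PySem.List.min?_mem hmin
    have hhi_mem : hi ∈ t := PySem.List.max?_mem hmax
    have hlo_min : ∀ y ∈ t, lo ≤ y := fun y hy => PySem.List.min?_isMin hmin y hy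
    have hhi_max : ∀ y ∈ t, y ≤ hi := fun y hy => PySem.List.max?_isMax hmax y hy
    have hEbound : ∀ p ∈ pvPairs t, pvE t p ≤ hi - lo := by
      intro p hp
      obtain ⟨h0, h12, h2n⟩ := (pv_mem_pairs t p).1 hp
      rw [hnlen] at h2n
      have hg1 : PySem.List.pyGetD t p.1 0 = t[p.1.toNat] :=
        PySem.List.pyGetD_eq_getElem t 0 h0 (by omega)
      have hg2 : PySem.List.pyGetD t p.2 0 = t[p.2.toNat] :=
        PySem.List.pyGetD_eq_getElem t 0 (by omega) (by omega)
      have hb1 : lo ≤ t[p.1.toNat] ∧ t[p.1.toNat] ≤ hi :=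
        ⟨hlo_min _ (List.getElem_mem _), hhi_max _ (List.getElem_mem _)⟩
      have hb2 : lo ≤ t[p.2.toNat] ∧ t[p.2.toNat] ≤ hi :=
        ⟨hlo_min _ (List.getElem_mem _), hhi_max _ (List.getElem_mem _)⟩
      unfold pvE
      rw [hg1, hg2]
      apply abs_le.2
      constructor <;> omega
    by_cases hlohi : lo = hi
    · -- all elements equal: the running max stays 0, both sides (0, 0)
      have hmx0 : pvMx t (pvPairs t) 0 = 0 := by
        rcases pvMx_attained t (pvPairs t) 0 with h | ⟨p, hp, he⟩
        · exact h
        · have h1 := hEbound p hp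
          have h2 : (0 : Int) ≤ pvE t p := abs_nonneg _
          have h3 := (pvMx_le t (pvPairs t) 0).1
          omega
      rw [hmx0, if_neg (by omega)]
      unfold indices_difference_maxi_alt
      rw [if_neg hlen, hmin, hmax]
      simp [hlohi]
    · have hlo_lt_hi : lo < hi := lt_of_le_of_ne (hlo_min hi hhi_mem) hlohi
      obtain ⟨ilo, hidxlo⟩ : ∃ k, PySem.List.index? t lo = some k := by
        cases hk : PySem.List.index? t lo with
        | none => exact absurd ((PySem.List.index?_eq_none_iff t lo).1 hk) (by simpa using hlo_mem)
        | some k => exact ⟨k, rfl⟩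
      obtain ⟨ihi, hidxhi⟩ : ∃ k, PySem.List.index? t hi = some k := by
        cases hk : PySem.List.index? t hi with
        | none => exact absurd ((PySem.List.index?_eq_none_iff t hi).1 hk) (by simpa using hhi_mem)
        | some k => exact ⟨k, rfl⟩
      obtain ⟨hilo_lt, hilo_val, hilo_first⟩ := PySem.List.getElem_of_index?_eq_some hidxlo
      obtain ⟨hihi_lt, hihi_val, hihi_first⟩ := PySem.List.getElem_of_index?_eq_some hidxhi
      have hne_idx : ilo ≠ ihi := by
        intro h; subst h; rw [hilo_val] at hihi_val; exact hlohi hihi_val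
      -- first occurrences bound every occurrence from below
      have hfirstlo : ∀ (k : Nat) (hk : k < t.length), t[k] = lo → ilo ≤ k := by
        intro k hk hv
        by_contra hkl
        exact hilo_first k (by omega) hv
      have hfirsthi : ∀ (k : Nat) (hk : k < t.length), t[k] = hi → ihi ≤ k := by
        intro k hk hv
        by_contra hkl
        exact hihi_first k (by omega) hv
      have hj0lo : min ilo ihi ≤ ilo := Nat.min_le_left _ _
      have hj0hi : min ilo ihi ≤ ihi := Nat.min_le_right _ _
      have hsum : min ilo ihi + max ilo ihi = ilo + ihi := min_add_max _ _
      have hxmem : (((min ilo ihi : Nat) : Int), ((max ilo ihi : Nat) : Int)) ∈ pvPairs t := by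
        rw [pv_mem_pairs, hnlen]
        refine ⟨by omega, by omega, by omega⟩
      have hval : (t[min ilo ihi]'(by omega) = lo ∧ t[max ilo ihi]'(by omega) = hi) ∨
          (t[min ilo ihi]'(by omega) = hi ∧ t[max ilo ihi]'(by omega) = lo) := by
        rcases Nat.lt_or_ge ilo ihi with hlt | hge
        · left
          simp only [Nat.min_eq_left (Nat.le_of_lt hlt), Nat.max_eq_right (Nat.le_of_lt hlt)]
          exact ⟨hilo_val, hihi_val⟩
        · right
          simp only [Nat.min_eq_right hge, Nat.max_eq_left hge]
          exact ⟨hihi_val, hilo_val⟩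
      have hgj0 : PySem.List.pyGetD t ((min ilo ihi : Nat) : Int) 0 = t[min ilo ihi]'(by omega) := by
        rw [PySem.List.pyGetD_eq_getElem t 0 (by omega) (by omega)]
        simp only [Int.toNat_natCast]
      have hgi0 : PySem.List.pyGetD t ((max ilo ihi : Nat) : Int) 0 = t[max ilo ihi]'(by omega) := by
        rw [PySem.List.pyGetD_eq_getElem t 0 (by omega) (by omega)]
        simp only [Int.toNat_natCast]
      have hEx : pvE t (((min ilo ihi : Nat) : Int), ((max ilo ihi : Nat) : Int)) = hi - lo := by
        unfold pvE
        dsimp only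
        rw [hgj0, hgi0]
        rcases hval with ⟨h1, h2⟩ | ⟨h1, h2⟩ <;>
          rcases abs_cases (t[max ilo ihi]'(by omega) - t[min ilo ihi]'(by omega)) with ⟨hc, _⟩ | ⟨hc, _⟩ <;>
            rw [hc] <;> omega
      have hmxeq : pvMx t (pvPairs t) 0 = hi - lo := by
        refine le_antisymm ?_ ?_
        · rcases pvMx_attained t (pvPairs t) 0 with h | ⟨p, hp, he⟩
          · omega
          · rw [← he]; exact hEbound p hp
        · rw [← hEx]; exact (pvMx_le t (pvPairs t) 0).2 _ hxmem
      rw [hmxeq, if_pos (by omega)]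
      have hfind : (pvPairs t).find? (fun p => pvE t p == hi - lo) =
          some (((min ilo ihi : Nat) : Int), ((max ilo ihi : Nat) : Int)) := by
        apply pv_find_first pvLex _ pvLex_asym _ (pv_pairs_pairwise t) _ hxmem (by simpa using hEx)
        intro y hy hpy
        obtain ⟨hy0, hy12, hy2n⟩ := (pv_mem_pairs t y).1 hy
        rw [hnlen] at hy2n
        have hyE : pvE t y = hi - lo := by simpa using hpy
        have hg1 : PySem.List.pyGetD t y.1 0 = t[y.1.toNat]'(by omega) :=
          PySem.List.pyGetD_eq_getElem t 0 hy0 (by omega)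
        have hg2 : PySem.List.pyGetD t y.2 0 = t[y.2.toNat]'(by omega) :=
          PySem.List.pyGetD_eq_getElem t 0 (by omega) (by omega)
        have hb1 : lo ≤ t[y.1.toNat]'(by omega) ∧ t[y.1.toNat]'(by omega) ≤ hi :=
          ⟨hlo_min _ (List.getElem_mem _), hhi_max _ (List.getElem_mem _)⟩
        have hb2 : lo ≤ t[y.2.toNat]'(by omega) ∧ t[y.2.toNat]'(by omega) ≤ hi :=
          ⟨hlo_min _ (List.getElem_mem _), hhi_max _ (List.getElem_mem _)⟩
        have hyv : (t[y.1.toNat]'(by omega) = lo ∧ t[y.2.toNat]'(by omega) = hi) ∨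
            (t[y.1.toNat]'(by omega) = hi ∧ t[y.2.toNat]'(by omega) = lo) := by
          unfold pvE at hyE
          rw [hg1, hg2] at hyE
          rcases abs_cases (t[y.2.toNat]'(by omega) - t[y.1.toNat]'(by omega)) with ⟨hc, _⟩ | ⟨hc, _⟩ <;>
            rw [hc] at hyE <;> omega
        have hlow : (ilo ≤ y.1.toNat ∧ ihi ≤ y.2.toNat) ∨ (ihi ≤ y.1.toNat ∧ ilo ≤ y.2.toNat) := by
          rcases hyv with ⟨h1, h2⟩ | ⟨h1, h2⟩
          · exact Or.inl ⟨hfirstlo _ (by omega) h1, hfirsthi _ (by omega) h2⟩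
          · exact Or.inr ⟨hfirsthi _ (by omega) h1, hfirstlo _ (by omega) h2⟩
        obtain ⟨y1, y2⟩ := y
        simp only [pvLex, Prod.ext_iff]
        simp only at hy0 hy12 hy2n hlow
        omega
      rw [hfind]
      -- B's branch
      unfold indices_difference_maxi_alt
      rw [if_neg hlen, hmin, hmax]
      have hbeq : (lo == hi) = false := by simp [hlohi]
      simp only [hbeq, Bool.false_eq_true, if_false, hidxlo, hidxhi]
      rcases Nat.lt_or_ge ilo ihi with hlt | hge
      · rw [if_pos hlt]
        simp only [Option.elim_some, Prod.mk.injEq]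
        constructor <;> · congr 1; omega
      · rw [if_neg (by omega)]
        simp only [Option.elim_some, Prod.mk.injEq]
        constructor <;> · congr 1; omega
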